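-- pv_equiv track=rewrite | github.com/Kapok-uii/worker-allocation | worker-assign/DGWO/src/calculateMakespan.py | calculateMakespan_Flowline
-- ===== SOURCE A (Python) =====
-- from collections import defaultdict
--
-- def calculateMakespan_Flowline(product_num,table):
--     task_times = defaultdict(lambda: defaultdict(int))
--     for task_list in table:
--         for task in task_list:
--             start_time, end_time, product, job = task
--             if task_times[product][job]==None:
--                 task_times[product][job]=end_time
--             if task_times[product][job]<end_time:
--                 task_times[product][job]=end_time
--     time_process_final=[]
--     for k in range(0,product_num):
--         sub_dict=task_times[k]
--         time_process_finish=[]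
--         for jobs in range(0,len(sub_dict)):
--             values_jobs=sub_dict[jobs]
--             time_process_finish.append(values_jobs )
--         time_process_final.append(time_process_finish)
--     return time_process_final
-- ===== SOURCE B (Python) =====
-- def calculateMakespan_Flowline(product_num, table):
--     # Dictionary-free brute force: flatten once, then answer each output cell
--     # by scanning the flat task list directly.
--     tasks = [t for row in table for t in row]
--     result = []
--     for k in range(product_num):
--         jobs_seen = {job for _, _, p, job in tasks if p == k}
--         row = []
--         for j in range(len(jobs_seen)):
--             row.append(max([0] + [e for _, e, p, job in tasks if p == k and job == j]))
--         result.append(row)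
--     return result
-- ===== Notes on version B (the rewrite author's own statement) =====
-- stated objective: alternative
-- what changed: Drops the defaultdict-of-defaultdict hash aggregation entirely: B flattens the table once and computes every output cell by a direct scan of the flat task list (distinct-job count via a set, each cell as max([0]+end_times)), O(P*J*T) nested scans instead of A's O(T) single-pass dict aggregation.
import Mathlib
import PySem

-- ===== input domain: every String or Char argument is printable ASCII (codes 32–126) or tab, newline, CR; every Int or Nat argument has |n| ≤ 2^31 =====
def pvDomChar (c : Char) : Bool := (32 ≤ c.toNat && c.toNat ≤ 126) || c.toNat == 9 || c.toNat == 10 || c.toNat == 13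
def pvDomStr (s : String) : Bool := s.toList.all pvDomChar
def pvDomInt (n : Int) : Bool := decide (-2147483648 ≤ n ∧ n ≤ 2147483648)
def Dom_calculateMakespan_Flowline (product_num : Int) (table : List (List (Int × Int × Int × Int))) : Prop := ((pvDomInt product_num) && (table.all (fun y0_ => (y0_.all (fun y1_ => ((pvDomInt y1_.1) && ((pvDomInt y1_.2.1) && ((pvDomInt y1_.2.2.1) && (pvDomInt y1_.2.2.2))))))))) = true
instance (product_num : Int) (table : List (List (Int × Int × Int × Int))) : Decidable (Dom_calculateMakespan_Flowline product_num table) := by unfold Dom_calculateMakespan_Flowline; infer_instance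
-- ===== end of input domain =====

-- B replaces A's defaultdict-of-defaultdict aggregation by dictionary-free
-- brute force: flatten once, then per-cell scans of the flat task list
-- (objective: alternative algorithm, no speed claim).

-- ===== PORT A =====

-- defaultdict(int) read: task_times[product][job] materialises a 0 entry for a missing key
def pvAGetInner (d : PySem.Dict Int Int) (k : Int) : Int × PySem.Dict Int Int :=
  match d.get? k with
  | some v => (v, d)
  | none => (0, d.insert k 0)

-- outer defaultdict read: task_times[k] materialises an empty inner dict for a missing key
def pvAGetOuter (t : PySem.Dict Int (PySem.Dict Int Int)) (k : Int) :
    PySem.Dict Int Int × PySem.Dict Int (PySem.Dict Int Int) :=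
  match t.get? k with
  | some d => (d, t)
  | none => (PySem.Dict.empty, t.insert k PySem.Dict.empty)

-- one task of the aggregation loop; the Python guard `task_times[product][job]==None`
-- compares an int with None and is therefore always False (kept as a dead `if false`)
def pvAStep (t : PySem.Dict Int (PySem.Dict Int Int)) (task : Int × Int × Int × Int) :
    PySem.Dict Int (PySem.Dict Int Int) :=
  let end_time := task.2.1
  let product := task.2.2.1
  let job := task.2.2.2
  let o := pvAGetOuter t product
  let i := pvAGetInner o.1 job
  let t2 := o.2.insert product i.2
  let t3 := if false then t2.insert product (i.2.insert job end_time) else t2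
  if i.1 < end_time then t3.insert product (i.2.insert job end_time) else t3

-- inner output loop: values_jobs = sub_dict[jobs] (a defaultdict read, so it threads the dict)
def pvAInnerOut (sub : PySem.Dict Int Int) (n : Int) : PySem.Dict Int Int × List Int :=
  (PySem.List.pyRange 0 n 1).foldl
    (fun st j =>
      let r := pvAGetInner st.1 j
      (r.2, st.2 ++ [r.1]))
    (sub, [])

def calculateMakespan_Flowline (product_num : Int) (table : List (List (Int × Int × Int × Int))) : List (List Int) :=
  let task_times := table.foldl (fun t task_list => task_list.foldl pvAStep t) PySem.Dict.empty
  let fin := (PySem.List.pyRange 0 product_num 1).foldl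
    (fun st k =>
      let o := pvAGetOuter st.1 k
      let r := pvAInnerOut o.1 ((o.1.size : Int))
      (o.2.insert k r.1, st.2 ++ [r.2]))
    (task_times, ([] : List (List Int)))
  fin.2

-- ===== PORT B =====

def calculateMakespan_Flowline_alt (product_num : Int) (table : List (List (Int × Int × Int × Int))) : List (List Int) :=
  -- tasks = [t for row in table for t in row]
  let tasks := table.flatMap (fun row => row)
  (PySem.List.pyRange 0 product_num 1).map (fun k =>
    -- jobs_seen = {job for _, _, p, job in tasks if p == k}
    let jobs_seen : PySem.Set Int :=
      PySem.Set.ofList (tasks.filterMap (fun t => if t.2.2.1 = k then some t.2.2.2 else none))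
    (PySem.List.pyRange 0 ((jobs_seen.length : Int)) 1).map (fun j =>
      -- max([0] + [e for _, e, p, job in tasks if p == k and job == j])
      ((tasks.filter (fun t => t.2.2.1 == k && t.2.2.2 == j)).map (fun t => t.2.1)).foldl max 0))

-- ===== PRECONDITION & SPEC =====
def Spec_calculateMakespan_Flowline (product_num : Int) (table : List (List (Int × Int × Int × Int))) (out : List (List Int)) : Prop := out = calculateMakespan_Flowline_alt product_num table
instance (product_num : Int) (table : List (List (Int × Int × Int × Int))) (out : List (List Int)) : Decidable (Spec_calculateMakespan_Flowline product_num table out) := by unfold Spec_calculateMakespan_Flowline; infer_instance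

-- ===== CLAIM (what is proved, stated in full; the proofs are below) =====
def Claim_equal_calculateMakespan_Flowline : Prop := ∀ (product_num : Int) (table : List (List (Int × Int × Int × Int))), Dom_calculateMakespan_Flowline product_num table → Spec_calculateMakespan_Flowline product_num table (calculateMakespan_Flowline product_num table)

-- ===== LEMMAS AND PROOFS =====

-- jobs of product p in a flat task list (B's set-comprehension body)
def pvJobsOf (ts : List (Int × Int × Int × Int)) (p : Int) : List Int :=
  ts.filterMap (fun t => if t.2.2.1 = p then some t.2.2.2 else none)

-- end times for (p, j) in a flat task list (B's list-comprehension body)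
def pvEsOf (ts : List (Int × Int × Int × Int)) (p j : Int) : List Int :=
  (ts.filter (fun t => t.2.2.1 == p && t.2.2.2 == j)).map (fun t => t.2.1)

-- characterisation of the defaultdict reads
theorem pvAGetInner_fst (d : PySem.Dict Int Int) (k : Int) :
    (pvAGetInner d k).1 = d.getD k 0 := by
  unfold pvAGetInner
  cases h : d.get? k with
  | none => simp [PySem.Dict.getD_of_get?_eq_none d _ h]
  | some v => simp [PySem.Dict.getD_of_get?_eq_some d _ h]

theorem pvAGetInner_getD (d : PySem.Dict Int Int) (k x : Int) :
    (pvAGetInner d k).2.getD x 0 = d.getD x 0 := by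
  unfold pvAGetInner
  cases h : d.get? k with
  | none =>
    simp only [PySem.Dict.getD_insert]
    by_cases hx : x = k
    · subst hx; simp [PySem.Dict.getD_of_get?_eq_none d _ h]
    · simp [hx]
  | some v => rfl

theorem pvAGetInner_keys (d : PySem.Dict Int Int) (k : Int) :
    (pvAGetInner d k).2.keys = if d.contains k then d.keys else d.keys ++ [k] := by
  unfold pvAGetInner
  rw [PySem.Dict.contains_eq_isSome_get?]
  cases h : d.get? k with
  | none =>
    rw [PySem.Dict.keys_insert_of_not_contains d (0 : Int) (by rw [PySem.Dict.contains_eq_isSome_get?, h]; rfl)]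
    simp
  | some v => rfl

theorem pvAGetInner_of_contains (d : PySem.Dict Int Int) (k : Int)
    (h : d.contains k = true) : (pvAGetInner d k).2 = d := by
  unfold pvAGetInner
  rw [PySem.Dict.contains_eq_isSome_get?] at h
  cases hg : d.get? k with
  | none => rw [hg] at h; simp at h
  | some v => rfl

theorem pvAGetOuter_fst (t : PySem.Dict Int (PySem.Dict Int Int)) (k : Int) :
    (pvAGetOuter t k).1 = t.getD k PySem.Dict.empty := by
  unfold pvAGetOuter
  cases h : t.get? k with
  | none => simp [PySem.Dict.getD_of_get?_eq_none t _ h]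
  | some d => simp [PySem.Dict.getD_of_get?_eq_some t _ h]

theorem pvAGetOuter_getD (t : PySem.Dict Int (PySem.Dict Int Int)) (k x : Int) :
    (pvAGetOuter t k).2.getD x PySem.Dict.empty = t.getD x PySem.Dict.empty := by
  unfold pvAGetOuter
  cases h : t.get? k with
  | none =>
    simp only [PySem.Dict.getD_insert]
    by_cases hx : x = k
    · subst hx; simp [PySem.Dict.getD_of_get?_eq_none t _ h]
    · simp [hx]
  | some d => rfl

-- the invariant tying A's nested-dict state to B's flat-list views
def pvInv (ts : List (Int × Int × Int × Int))
    (t : PySem.Dict Int (PySem.Dict Int Int)) : Prop :=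
  (∀ p, (t.getD p PySem.Dict.empty).keys = PySem.Set.ofList (pvJobsOf ts p)) ∧
  (∀ p j, (t.getD p PySem.Dict.empty).getD j 0 = (pvEsOf ts p j).foldl max 0)

theorem pvInv_empty : pvInv [] PySem.Dict.empty :=
  ⟨fun _ => rfl, fun _ _ => rfl⟩

theorem pvAStep_getD (t : PySem.Dict Int (PySem.Dict Int Int)) (s e p j x : Int) :
    (pvAStep t (s, e, p, j)).getD x PySem.Dict.empty =
      if x = p then
        (if (t.getD p PySem.Dict.empty).getD j 0 < e
          then (pvAGetInner (t.getD p PySem.Dict.empty) j).2.insert j e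
          else (pvAGetInner (t.getD p PySem.Dict.empty) j).2)
      else t.getD x PySem.Dict.empty := by
  unfold pvAStep
  simp only [Bool.false_eq_true, if_false]
  rw [pvAGetOuter_fst, pvAGetInner_fst]
  by_cases hc : (t.getD p PySem.Dict.empty).getD j 0 < e
  · simp only [hc, if_true, PySem.Dict.insert_insert_self, PySem.Dict.getD_insert,
      pvAGetOuter_getD]
  · simp only [hc, if_false, PySem.Dict.getD_insert, pvAGetOuter_getD]

theorem pvJobsOf_append_one (ts : List (Int × Int × Int × Int)) (s e p j x : Int) :
    pvJobsOf (ts ++ [(s, e, p, j)]) x =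
      pvJobsOf ts x ++ (if p = x then [j] else []) := by
  unfold pvJobsOf
  rw [List.filterMap_append]
  by_cases h : p = x <;> simp [h]

theorem pvEsOf_append_one (ts : List (Int × Int × Int × Int)) (s e p j x y : Int) :
    pvEsOf (ts ++ [(s, e, p, j)]) x y =
      pvEsOf ts x y ++ (if p = x ∧ j = y then [e] else []) := by
  unfold pvEsOf
  rw [List.filter_append, List.map_append]
  by_cases hx : p = x <;> by_cases hy : j = y <;> simp [hx, hy]

-- Set.ofList of one appended element = Set.add
theorem pvOfList_append_one (l : List Int) (a : Int) :
    PySem.Set.ofList (l ++ [a]) = PySem.Set.add (PySem.Set.ofList l) a := by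
  rw [PySem.Set.ofList_eq_foldl, PySem.Set.ofList_eq_foldl, List.foldl_append]
  rfl

theorem pvInv_step (ts : List (Int × Int × Int × Int))
    (t : PySem.Dict Int (PySem.Dict Int Int))
    (task : Int × Int × Int × Int) (h : pvInv ts t) :
    pvInv (ts ++ [task]) (pvAStep t task) := by
  obtain ⟨hk, hv⟩ := h
  obtain ⟨s, e, p, j⟩ := task
  constructor
  · intro x
    rw [pvAStep_getD, pvJobsOf_append_one]
    by_cases hx : x = p
    · subst hx
      rw [if_pos rfl, if_pos rfl, pvOfList_append_one]
      have hmemkeys : (t.getD x PySem.Dict.empty).contains j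
          = PySem.Set.contains (PySem.Set.ofList (pvJobsOf ts x)) j := by
        rw [PySem.Dict.contains_eq_decide_mem_keys, hk x, PySem.Set.contains]
        simp [PySem.Set.mem_ofList]
      by_cases hcont : (t.getD x PySem.Dict.empty).contains j = true
      · have hi2 := pvAGetInner_of_contains _ _ hcont
        have hsc : PySem.Set.contains (PySem.Set.ofList (pvJobsOf ts x)) j = true := by
          rw [← hmemkeys]; exact hcont
        rw [PySem.Set.add, hsc, if_pos rfl]
        by_cases hc : (t.getD x PySem.Dict.empty).getD j 0 < e
        · rw [if_pos hc, hi2, PySem.Dict.keys_insert_of_contains _ _ hcont, hk x]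
        · rw [if_neg hc, hi2, hk x]
      · have hcont' : (t.getD x PySem.Dict.empty).contains j = false := by
          cases hb : (t.getD x PySem.Dict.empty).contains j
          · rfl
          · exact absurd hb hcont
        have hsc : PySem.Set.contains (PySem.Set.ofList (pvJobsOf ts x)) j = false := by
          rw [← hmemkeys]; exact hcont'
        rw [PySem.Set.add, hsc]
        simp only [Bool.false_eq_true, if_false]
        have hi2keys : (pvAGetInner (t.getD x PySem.Dict.empty) j).2.keys
            = (t.getD x PySem.Dict.empty).keys ++ [j] := by
          rw [pvAGetInner_keys, hcont']; simp
        have hi2cont : (pvAGetInner (t.getD x PySem.Dict.empty) j).2.contains j = true := by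
          rw [PySem.Dict.contains_eq_decide_mem_keys, hi2keys]; simp
        by_cases hc : (t.getD x PySem.Dict.empty).getD j 0 < e
        · rw [if_pos hc, PySem.Dict.keys_insert_of_contains _ _ hi2cont, hi2keys, hk x]
        · rw [if_neg hc, hi2keys, hk x]
    · have hpx : ¬ p = x := fun hpx => hx hpx.symm
      rw [if_neg hx, if_neg hpx, List.append_nil, hk x]
  · intro x y
    rw [pvAStep_getD, pvEsOf_append_one]
    by_cases hx : x = p
    · subst hx
      simp only [if_true, true_and]
      by_cases hy : j = y
      · subst hy
        simp only [if_true, List.foldl_append, List.foldl_cons, List.foldl_nil]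
        rw [← hv x j]
        by_cases hc : (t.getD x PySem.Dict.empty).getD j 0 < e
        · rw [if_pos hc, PySem.Dict.getD_insert_self]
          omega
        · rw [if_neg hc, pvAGetInner_getD]
          omega
      · rw [if_neg hy, List.append_nil]
        rw [apply_ite (fun d => PySem.Dict.getD d y 0)]
        have hyj : y ≠ j := fun hh => hy hh.symm
        simp only [PySem.Dict.getD_insert_of_ne _ _ _ hyj, pvAGetInner_getD, ite_self]
        exact hv x y
    · have : ¬ (p = x ∧ j = y) := fun hh => hx hh.1.symm
      rw [if_neg hx, if_neg this, List.append_nil]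
      exact hv x y

-- folding A's step over a task list extends the invariant
theorem pvInv_foldl (l : List (Int × Int × Int × Int))
    (ts : List (Int × Int × Int × Int)) (t : PySem.Dict Int (PySem.Dict Int Int))
    (h : pvInv ts t) : pvInv (ts ++ l) (l.foldl pvAStep t) := by
  induction l generalizing ts t with
  | nil => simpa using h
  | cons x xs ih =>
    have := ih (ts ++ [x]) (pvAStep t x) (pvInv_step ts t x h)
    simpa using this

-- A's nested fold equals the fold over the flattened task list, and satisfies the invariant
theorem pvInv_table (table : List (List (Int × Int × Int × Int))) :
    pvInv (table.flatMap (fun row => row))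
      (table.foldl (fun t task_list => task_list.foldl pvAStep t) PySem.Dict.empty) := by
  suffices h : ∀ (ts : List (Int × Int × Int × Int)) (t : PySem.Dict Int (PySem.Dict Int Int)),
      pvInv ts t →
      pvInv (ts ++ table.flatMap (fun row => row))
        (table.foldl (fun t task_list => task_list.foldl pvAStep t) t) by
    simpa using h [] PySem.Dict.empty pvInv_empty
  induction table with
  | nil => intro ts t h; simpa using h
  | cons row rest ih =>
    intro ts t h
    have := ih (ts ++ row) (row.foldl pvAStep t) (pvInv_foldl row ts t h)
    simpa using this

-- the stateful inner output loop reads exactly the getD-view of its starting dict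
theorem pvAInner_view (L : List Int) (sub : PySem.Dict Int Int) (row : List Int)
    (f : Int → Int) (hf : ∀ x, sub.getD x 0 = f x) :
    (L.foldl (fun st j => let r := pvAGetInner st.1 j; (r.2, st.2 ++ [r.1])) (sub, row)).2
      = row ++ L.map f := by
  induction L generalizing sub row with
  | nil => simp
  | cons a L ih =>
    simp only [List.foldl_cons, List.map_cons]
    rw [ih _ _ (fun x => (pvAGetInner_getD sub a x).trans (hf x))]
    simp [pvAGetInner_fst, hf a]

theorem pvAInnerOut_snd (sub : PySem.Dict Int Int) (n : Int) :
    (pvAInnerOut sub n).2 = (PySem.List.pyRange 0 n 1).map (fun j => sub.getD j 0) :=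
  pvAInner_view _ _ _ _ (fun _ => rfl)

-- the stateful outer output loop, over a Nodup key list, reads the pure per-key view
theorem pvAOuter_view (L : List Int) (hL : L.Nodup)
    (t : PySem.Dict Int (PySem.Dict Int Int)) (acc : List (List Int)) :
    ((L.foldl (fun st k =>
        let o := pvAGetOuter st.1 k
        let r := pvAInnerOut o.1 ((o.1.size : Int))
        (o.2.insert k r.1, st.2 ++ [r.2])) (t, acc)).2)
      = acc ++ L.map (fun k =>
          (PySem.List.pyRange 0 (((t.getD k PySem.Dict.empty).size : Int)) 1).map
            (fun j => (t.getD k PySem.Dict.empty).getD j 0)) := by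
  induction L generalizing t acc with
  | nil => simp
  | cons k L ih =>
    obtain ⟨hk, hL'⟩ := List.nodup_cons.mp hL
    simp only [List.foldl_cons, List.map_cons]
    rw [ih hL']
    simp only [List.append_assoc, List.singleton_append]
    congr 1
    congr 1
    · rw [pvAInnerOut_snd, pvAGetOuter_fst]
    · refine List.map_congr_left ?_
      intro k' hk'
      have hne : k' ≠ k := fun hne => hk (hne ▸ hk')
      simp only [PySem.Dict.getD_insert_of_ne _ _ _ hne, pvAGetOuter_getD]

-- size = number of keys (row lengths in the output phases)
theorem pvSize_eq_keys_length {κ ν : Type} [BEq κ] (d : PySem.Dict κ ν) :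
    d.size = d.keys.length := by
  simp [PySem.Dict.size, PySem.Dict.keys]

-- ===== VERDICT (by name: the statement is the Claim_ definition above) =====
theorem calculateMakespan_Flowline_spec : Claim_equal_calculateMakespan_Flowline := by
  intro pn table _
  unfold Spec_calculateMakespan_Flowline calculateMakespan_Flowline calculateMakespan_Flowline_alt
  simp only []
  obtain ⟨hk, hv⟩ := pvInv_table table
  have hnd : (PySem.List.pyRange 0 pn 1).Nodup :=
    (PySem.List.pairwise_lt_pyRange_one 0 pn).imp (fun h => ne_of_lt h)
  rw [pvAOuter_view _ hnd]
  simp only [List.nil_append]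
  refine List.map_congr_left ?_
  intro k _
  have hsize : (((table.foldl (fun t task_list => task_list.foldl pvAStep t)
        PySem.Dict.empty).getD k PySem.Dict.empty).size : Int)
      = ((PySem.Set.ofList (pvJobsOf (table.flatMap (fun row => row)) k)).length : Int) := by
    rw [pvSize_eq_keys_length, hk k]
  rw [hsize]
  refine List.map_congr_left ?_
  intro jj _
  rw [hv k jj]
  rfl
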